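-- pv_equiv track=rewrite | github.com/polirritmico/codesignal_solutions | Python/Intro/commonCharacterCount.py | solution
-- ===== SOURCE A (Python) =====
-- def solution(s1, s2):
--     grp1 = dict()
--     grp2 = dict()
--     output = 0
--     for char in s1:
--         grp1[char] = grp1.get(char, 0) + 1
--     for char in s2:
--         grp2[char] = grp2.get(char, 0) + 1
--     for char in grp1:
--         if char in grp2:
--             output += min(grp1[char], grp2[char])
--     return output
-- ===== SOURCE B (Python) =====
-- def solution(s1, s2):
--     counts = {}
--     for c in s1:
--         counts[c] = counts.get(c, 0) + 1
--     output = 0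
--     for c in s2:
--         if counts.get(c, 0) > 0:
--             counts[c] = counts[c] - 1
--             output += 1
--     return output
-- ===== Notes on version B (the rewrite author's own statement) =====
-- stated objective: alternative
-- what changed: B keeps only one frequency table (for s1) and does the matching in a single consume-and-decrement pass over s2, instead of building two tables and summing min over shared keys.
import Mathlib
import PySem

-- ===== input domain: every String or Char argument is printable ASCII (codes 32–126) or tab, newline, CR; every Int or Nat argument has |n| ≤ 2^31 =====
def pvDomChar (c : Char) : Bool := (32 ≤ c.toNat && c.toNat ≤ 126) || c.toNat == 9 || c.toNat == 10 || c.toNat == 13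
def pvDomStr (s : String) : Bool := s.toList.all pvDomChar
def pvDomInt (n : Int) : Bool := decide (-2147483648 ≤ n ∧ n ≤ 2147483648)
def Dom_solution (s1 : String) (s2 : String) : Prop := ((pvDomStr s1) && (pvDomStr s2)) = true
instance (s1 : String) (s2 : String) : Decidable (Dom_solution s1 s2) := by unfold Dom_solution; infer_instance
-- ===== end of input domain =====

-- B replaces A's two frequency tables + min-sum over shared keys by a single table for s1
-- consumed in one pass over s2 (alternative decomposition, same cost).

-- ===== PORT A =====
def solution (s1 : String) (s2 : String) : Int :=
  let grp1 := s1.toList.foldl (fun d c => d.insert c (d.getD c 0 + 1)) PySem.Dict.empty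
  let grp2 := s2.toList.foldl (fun d c => d.insert c (d.getD c 0 + 1)) PySem.Dict.empty
  -- 'for char in grp1' iterates the dict's keys; grp1[char]/grp2[char] are lookups of keys
  -- known present (char is a key of grp1, and is checked to be in grp2), ported as getD _ 0
  grp1.keys.foldl
    (fun out c => if grp2.contains c then out + min (grp1.getD c 0) (grp2.getD c 0) else out) 0

-- ===== PORT B =====
def solution_alt (s1 : String) (s2 : String) : Int :=
  let counts := s1.toList.foldl (fun d c => d.insert c (d.getD c 0 + 1)) PySem.Dict.empty
  (s2.toList.foldl
    (fun (st : PySem.Dict Char Int × Int) c =>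
      if st.1.getD c 0 > 0 then (st.1.insert c (st.1.getD c 0 - 1), st.2 + 1) else st)
    (counts, 0)).2

-- ===== PRECONDITION & SPEC =====
def Spec_solution (s1 : String) (s2 : String) (out : Int) : Prop := out = solution_alt s1 s2
instance (s1 : String) (s2 : String) (out : Int) : Decidable (Spec_solution s1 s2 out) := by unfold Spec_solution; infer_instance

-- ===== CLAIM (what is proved, stated in full; the proofs are below) =====
def Claim_equal_solution : Prop := ∀ (s1 : String) (s2 : String), Dom_solution s1 s2 → Spec_solution s1 s2 (solution s1 s2)

-- ===== LEMMAS AND PROOFS =====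

-- A's key loop: an if-guarded accumulating foldl is the sum of the guarded terms.
lemma foldl_if_add (l : List Char) (p : Char → Bool) (f : Char → Int) (out : Int) :
    l.foldl (fun out c => if p c then out + f c else out) out
      = out + (l.map (fun c => if p c then f c else 0)).sum := by
  induction l generalizing out with
  | nil => simp
  | cons a l ih => by_cases h : p a <;> simp [h, ih, add_assoc]

-- A nodup list's mapped sum is the Finset sum over its elements.
lemma toFinset_ofList (l : List Char) : (PySem.Set.ofList l).toFinset = l.toFinset := by
  ext c; simp [PySem.Set.mem_ofList]

-- B's consume-and-decrement pass over t, from any nonnegative table d, matches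
-- min(table, multiplicity) summed over the distinct characters of t.
lemma bfold (t : List Char) (d : PySem.Dict Char Int) (out : Int)
    (hd : ∀ c, 0 ≤ d.getD c 0) :
    (t.foldl
      (fun (st : PySem.Dict Char Int × Int) c =>
        if st.1.getD c 0 > 0 then (st.1.insert c (st.1.getD c 0 - 1), st.2 + 1) else st)
      (d, out)).2
      = out + ∑ c ∈ t.toFinset, min (d.getD c 0) ((t.count c : Int)) := by
  induction t generalizing d out with
  | nil => simp
  | cons a t ih =>
    have hnn : (0:Int) ≤ d.getD a 0 := hd a
    have hsplit : ∀ g : Char → Int, ∑ c ∈ (a :: t).toFinset, g c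
        = g a + ∑ c ∈ t.toFinset.erase a, g c := by
      intro g
      rw [List.toFinset_cons, ← Finset.insert_erase (Finset.mem_insert_self a t.toFinset),
        Finset.sum_insert (Finset.notMem_erase a _), Finset.erase_insert_eq_erase]
    by_cases hv : d.getD a 0 > 0
    · simp only [List.foldl_cons, if_pos hv]
      rw [ih (d.insert a (d.getD a 0 - 1)) (out + 1) (by
        intro c; rw [PySem.Dict.getD_insert]; split
        · omega
        · exact hd c)]
      rw [hsplit]
      have herase : ∀ c ∈ t.toFinset.erase a,
          min ((d.insert a (d.getD a 0 - 1)).getD c 0) ((t.count c : Int))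
            = min (d.getD c 0) (((a :: t).count c : Int)) := by
        intro c hc
        have hca : c ≠ a := (Finset.mem_erase.mp hc).1
        rw [PySem.Dict.getD_insert, if_neg hca]
        simp [Ne.symm hca]
      by_cases ha : a ∈ t.toFinset
      · rw [← Finset.sum_erase_add t.toFinset _ ha, Finset.sum_congr rfl herase]
        have hcnt : ((a :: t).count a : Int) = (t.count a : Int) + 1 := by
          simp [List.count_cons_self]
        rw [PySem.Dict.getD_insert, if_pos rfl, hcnt]
        have hkn : (0:Int) ≤ (t.count a : Int) := by positivity
        omega
      · have hea : t.toFinset.erase a = t.toFinset := Finset.erase_eq_of_notMem ha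
        have hta : t.count a = 0 := by
          rw [List.count_eq_zero]; intro h; exact ha (List.mem_toFinset.mpr h)
        rw [hea] at herase
        rw [Finset.sum_congr rfl herase]
        have : ((a :: t).count a : Int) = 1 := by simp [List.count_cons_self, hta]
        rw [hea, this]
        omega
    · simp only [List.foldl_cons, if_neg hv]
      rw [ih d out hd, hsplit]
      have hv0 : d.getD a 0 = 0 := by omega
      have herase : ∀ c ∈ t.toFinset.erase a,
          min (d.getD c 0) (((a :: t).count c : Int)) = min (d.getD c 0) ((t.count c : Int)) := by
        intro c hc
        have hca : c ≠ a := (Finset.mem_erase.mp hc).1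
        simp [Ne.symm hca]
      rw [Finset.sum_congr rfl herase]
      have hmin : min (d.getD a 0) (((a :: t).count a : Int)) = 0 := by
        have : (0:Int) ≤ ((a :: t).count a : Int) := by positivity
        omega
      rw [hmin]
      by_cases ha : a ∈ t.toFinset
      · rw [← Finset.sum_erase_add t.toFinset _ ha]
        have : min (d.getD a 0) ((t.count a : Int)) = 0 := by rw [hv0]; simp
        omega
      · rw [Finset.erase_eq_of_notMem ha]
        omega

-- the common value: sum over shared characters of min multiplicity
lemma sum_min_comm (L1 L2 : List Char) :
    ∑ c ∈ L1.toFinset, (if c ∈ L2 then min ((L1.count c : Int)) ((L2.count c : Int)) else 0)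
      = ∑ c ∈ L2.toFinset, min ((L1.count c : Int)) ((L2.count c : Int)) := by
  rw [← Finset.sum_filter]
  have hfil : L1.toFinset.filter (fun c => c ∈ L2) = L1.toFinset ∩ L2.toFinset := by
    ext c; simp
  rw [hfil]
  apply Finset.sum_subset Finset.inter_subset_right
  intro c hc2 hci
  have hc1 : c ∉ L1 := by
    intro h; exact hci (Finset.mem_inter.mpr ⟨List.mem_toFinset.mpr h, hc2⟩)
  have : L1.count c = 0 := List.count_eq_zero.mpr hc1
  rw [this]; simp

-- ===== VERDICT (by name: the statement is the Claim_ definition above) =====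
theorem solution_spec : Claim_equal_solution := by
  intro s1 s2 _
  unfold Spec_solution solution solution_alt
  simp only [PySem.Dict.foldl_insert_getD_add_one_eq_counter]
  rw [foldl_if_add, bfold _ _ _ (by intro c; rw [PySem.Dict.getD_counter]; positivity)]
  rw [PySem.Dict.keys_counter,
    ← List.sum_toFinset _ (PySem.Set.nodup_ofList s1.toList), toFinset_ofList]
  simp only [PySem.Dict.getD_counter, PySem.Dict.contains_counter, zero_add]
  rw [← sum_min_comm]
  apply Finset.sum_congr rfl
  intro c _
  by_cases h : c ∈ s2.toList <;> simp [h]
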